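-- pv_equiv track=rewrite | github.com/sonwy102/ycharts-coding-challenge | reconciliation.py | calculate_recon
-- ===== SOURCE A (Python) =====
-- def calculate_recon(pos_expected, pos_observed):
--     """Performs unit reconciliation for all positions in the account.
--
--     Args:
--         pos_expected (dict): positions and their expected shares/values
--         pos_observed (dict): positions and their observed shares/values in account
--
--     Returns:
--         dict: positions that failed the unit reconciliation mapped to the
--         discrepancies in shares/values
--     """
--
--     recon_fails = pos_observed.copy()
--     for symbol in pos_expected:
--         if symbol not in pos_observed:
--             recon_fails[symbol] = 0 - pos_expected[symbol]
--         else: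
--             recon_fails[symbol] -= pos_expected[symbol]
--
--         if recon_fails[symbol] == 0:
--             recon_fails.pop(symbol)
--
--     return recon_fails
-- ===== SOURCE B (Python) =====
-- def calculate_recon(pos_expected, pos_observed):
--     """Performs unit reconciliation for all positions in the account.
--
--     Single dict comprehension over the key union {**pos_observed, **pos_expected}:
--     each key maps to observed-minus-expected; a key is kept unless it occurs in
--     pos_expected and its difference is zero (observed-only keys are always kept).
--     """
--     return {s: diff
--             for s in {**pos_observed, **pos_expected}
--             if (diff := pos_observed.get(s, 0) - pos_expected.get(s, 0)) != 0
--                or s not in pos_expected}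
-- ===== Notes on version B (the rewrite author's own statement) =====
-- stated objective: simpler
-- what changed: Replaces the copy-then-mutate-then-pop loop over pos_expected with a single dict comprehension over the key union {**pos_observed, **pos_expected}, mapping each key to observed-minus-expected and keeping a key unless it is in pos_expected with a zero difference.
import Mathlib
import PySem

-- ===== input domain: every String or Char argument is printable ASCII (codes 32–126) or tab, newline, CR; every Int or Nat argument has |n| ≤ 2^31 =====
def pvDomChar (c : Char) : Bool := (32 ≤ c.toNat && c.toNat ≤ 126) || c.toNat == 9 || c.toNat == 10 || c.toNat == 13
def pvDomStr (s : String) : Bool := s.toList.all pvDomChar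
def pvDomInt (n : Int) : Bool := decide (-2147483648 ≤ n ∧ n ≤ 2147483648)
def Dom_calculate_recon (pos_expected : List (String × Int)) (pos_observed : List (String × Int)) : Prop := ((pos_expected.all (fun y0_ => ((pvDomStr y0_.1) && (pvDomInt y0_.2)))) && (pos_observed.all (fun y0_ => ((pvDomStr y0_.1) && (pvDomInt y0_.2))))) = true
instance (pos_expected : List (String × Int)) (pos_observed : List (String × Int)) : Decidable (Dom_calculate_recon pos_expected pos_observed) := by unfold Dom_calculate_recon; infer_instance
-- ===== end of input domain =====

-- B replaces A's copy-then-mutate-then-pop loop with a single comprehension-style pass over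
-- the key union {**pos_observed, **pos_expected}; same asymptotic cost, simpler shape.

-- ===== PORT A =====
-- loop body of A's 'for symbol in pos_expected', verbatim (rf = recon_fails)
def calculate_recon_step (pe po : PySem.Dict String Int) (rf : PySem.Dict String Int) (symbol : String) : PySem.Dict String Int :=
  let rf1 := if po.contains symbol = false
             then rf.insert symbol (0 - pe.getD symbol 0)
             else rf.modify symbol 0 (fun v => v - pe.getD symbol 0)
  if rf1.getD symbol 0 = 0 then rf1.erase symbol else rf1

def calculate_recon (pos_expected : List (String × Int)) (pos_observed : List (String × Int)) : List (String × Int) :=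
  let pe := PySem.Dict.ofList pos_expected
  let po := PySem.Dict.ofList pos_observed
  let recon_fails := pe.keys.foldl (calculate_recon_step pe po) po
  recon_fails.items

-- ===== PORT B =====
def calculate_recon_alt (pos_expected : List (String × Int)) (pos_observed : List (String × Int)) : List (String × Int) :=
  let pe := PySem.Dict.ofList pos_expected
  let po := PySem.Dict.ofList pos_observed
  let union := po.update pe.items      -- {**pos_observed, **pos_expected}
  union.keys.foldl (fun acc s =>
      let diff := po.getD s 0 - pe.getD s 0
      if diff != 0 || !pe.contains s then acc ++ [(s, diff)] else acc) []

-- ===== PRECONDITION & SPEC =====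
def Spec_calculate_recon (pos_expected : List (String × Int)) (pos_observed : List (String × Int)) (out : List (String × Int)) : Prop := out = calculate_recon_alt pos_expected pos_observed
instance (pos_expected : List (String × Int)) (pos_observed : List (String × Int)) (out : List (String × Int)) : Decidable (Spec_calculate_recon pos_expected pos_observed out) := by unfold Spec_calculate_recon; infer_instance

-- ===== CLAIM (what is proved, stated in full; the proofs are below) =====
def Claim_equal_calculate_recon : Prop := ∀ (pos_expected : List (String × Int)) (pos_observed : List (String × Int)), Dom_calculate_recon pos_expected pos_observed → Spec_calculate_recon pos_expected pos_observed (calculate_recon pos_expected pos_observed)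

-- ===== LEMMAS AND PROOFS =====

-- membership test over an items list with the s-entries removed, at a key k ≠ s
theorem pvAny_filter_ne (l : List (String × Int)) (s k : String) (h : k ≠ s) :
    (l.filter (fun p => !(p.1 == s))).any (fun p => p.1 == k) = l.any (fun p => p.1 == k) := by
  induction l with
  | nil => rfl
  | cons a t ih =>
    by_cases ha : a.1 = s
    · simp [ha, Ne.symm h, ih]
    · simp [List.any_cons, ha, ih]

-- A's loop invariant: folding the step over a nodup key list L, starting from a dict d that
-- agrees with po on key membership for all keys of L, produces exactly the filter/adjust of
-- d.items followed by the fresh expected-only nonzero entries of L.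
theorem pvA_inv (pe po : PySem.Dict String Int) (L : List String) :
    ∀ d : PySem.Dict String Int, L.Nodup → d.keys.Nodup →
    (∀ k ∈ L, d.contains k = po.contains k) →
    (L.foldl (calculate_recon_step pe po) d).items
      = (d.items.filter (fun p => !(L.contains p.1 && (p.2 - pe.getD p.1 0 == 0)))).map
            (fun p => if L.contains p.1 then (p.1, p.2 - pe.getD p.1 0) else p)
        ++ (L.filter (fun k => !po.contains k && !((0 : Int) - pe.getD k 0 == 0))).map
            (fun k => (k, 0 - pe.getD k 0)) := by
  induction L with
  | nil => intro d _ _ _; simp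
  | cons s L' ih =>
    intro d hnd hk hc
    have hsL' : s ∉ L' := (List.nodup_cons.mp hnd).1
    have hndL' : L'.Nodup := (List.nodup_cons.mp hnd).2
    have hds : d.contains s = po.contains s := hc s (by simp)
    have hval : ∀ p ∈ d.items, p.1 = s → p.2 = d.getD s 0 := by
      intro p hp hps
      have h1 : (p.1, p.2) ∈ d.items := by simpa using hp
      have h2 := PySem.Dict.getD_of_mem_items d h1 hk 0
      rw [hps] at h2; exact h2.symm
    have hLs : L'.contains s = false := by simp [hsL']
    rw [List.foldl_cons]
    by_cases hpo : po.contains s = true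
    · -- symbol already observed: modify in place
      have hdc : d.contains s = true := hds.trans hpo
      have htail : (s :: L').filter (fun k => !po.contains k && !((0 : Int) - pe.getD k 0 == 0))
          = L'.filter (fun k => !po.contains k && !((0 : Int) - pe.getD k 0 == 0)) := by
        rw [List.filter_cons]; simp [hpo]
      by_cases hz : d.getD s 0 - pe.getD s 0 = 0
      · -- difference zero: entry is popped
        have hstep : calculate_recon_step pe po d s
            = PySem.Dict.mk (d.items.filter (fun p => !(p.1 == s))) := by
          have h1 : calculate_recon_step pe po d s
              = (d.modify s 0 (fun v => v - pe.getD s 0)).erase s := by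
            simp [calculate_recon_step, hpo, PySem.Dict.getD_modify_self, hz]
          rw [h1]
          apply PySem.Dict.ext
          show ((d.modify s 0 (fun v => v - pe.getD s 0)).items.filter (fun p => !(p.1 == s))) = _
          rw [PySem.Dict.modify, PySem.Dict.items_insert_of_contains d _ hdc]
          rw [List.filter_map, List.filter_congr (q := fun p => !(p.1 == s))
            (by intro p hp; by_cases hps : p.1 = s <;> simp [hps])]
          show _ = d.items.filter (fun p => !(p.1 == s))
          have hmap : (d.items.filter (fun p => !(p.1 == s))).map
                (fun p => if (p.1 == s) = true then (s, d.getD s 0 - pe.getD s 0) else p)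
              = (d.items.filter (fun p => !(p.1 == s))).map id := by
            apply List.map_congr_left
            intro p hp
            have hps : ¬ (p.1 = s) := by
              have := (List.mem_filter.mp hp).2; by_cases h : p.1 = s <;> simp_all
            simp [hps]
          rw [hmap, List.map_id]
        rw [hstep]
        have hk' : (PySem.Dict.mk (d.items.filter (fun p => !(p.1 == s)))).keys.Nodup := by
          simp only [PySem.Dict.keys] at hk ⊢
          exact hk.sublist (List.Sublist.map _ List.filter_sublist)
        have hc' : ∀ k ∈ L', (PySem.Dict.mk (d.items.filter (fun p => !(p.1 == s)))).contains k
            = po.contains k := by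
          intro k hkL
          have hks : k ≠ s := fun h => hsL' (h ▸ hkL)
          have h2 : (PySem.Dict.mk (d.items.filter (fun p => !(p.1 == s)))).contains k
              = d.contains k := pvAny_filter_ne d.items s k hks
          rw [h2]; exact hc k (by simp [hkL])
        rw [ih _ hndL' hk' hc', htail]
        show ((d.items.filter (fun p => !(p.1 == s))).filter _).map _ ++ _ = _
        rw [List.filter_filter]
        have hfeq : d.items.filter
              (fun p => ((!(L'.contains p.1 && (p.2 - pe.getD p.1 0 == 0))) && !(p.1 == s)))
            = d.items.filter
              (fun p => !((s :: L').contains p.1 && (p.2 - pe.getD p.1 0 == 0))) := by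
          apply List.filter_congr
          intro p hp
          by_cases hps : p.1 = s
          · have hv : p.2 = d.getD s 0 := hval p hp hps
            simp [hps, hv, hz]
          · simp [hps]
        rw [hfeq]
        congr 1
        apply List.map_congr_left
        intro p hp
        have hpd : p ∈ d.items := (List.mem_filter.mp hp).1
        have hkeep := (List.mem_filter.mp hp).2
        by_cases hps : p.1 = s
        · exfalso
          have hv : p.2 = d.getD s 0 := hval p hpd hps
          simp [hps, hv, hz] at hkeep
        · simp [hps]
      · -- difference nonzero: entry is updated in place
        have hstep : calculate_recon_step pe po d s = d.insert s (d.getD s 0 - pe.getD s 0) := by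
          simp [calculate_recon_step, hpo, hz, PySem.Dict.modify]
        rw [hstep]
        have hk' : (d.insert s (d.getD s 0 - pe.getD s 0)).keys.Nodup :=
          PySem.Dict.nodup_keys_insert _ _ _ hk
        have hc' : ∀ k ∈ L', (d.insert s (d.getD s 0 - pe.getD s 0)).contains k
            = po.contains k := by
          intro k hkL
          have hks : k ≠ s := fun h => hsL' (h ▸ hkL)
          rw [PySem.Dict.contains_insert]
          simp [hks, hc k (by simp [hkL])]
        rw [ih _ hndL' hk' hc', htail]
        rw [PySem.Dict.items_insert_of_contains d _ hdc]
        rw [List.filter_map, List.map_map]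
        rw [List.filter_congr
          (q := fun p => !((s :: L').contains p.1 && (p.2 - pe.getD p.1 0 == 0)))
          (by
            intro p hp
            by_cases hps : p.1 = s
            · have hv : p.2 = d.getD s 0 := hval p hp hps
              simp [Function.comp, hps, hv, hz, hsL']
            · simp [Function.comp, hps])]
        congr 1
        apply List.map_congr_left
        intro p hp
        have hpd : p ∈ d.items := (List.mem_filter.mp hp).1
        by_cases hps : p.1 = s
        · have hv : p.2 = d.getD s 0 := hval p hpd hps
          simp [Function.comp, hps, hsL', hv]
        · simp [Function.comp, hps]
    · -- symbol not observed: fresh insert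
      have hpo' : po.contains s = false := by simpa using hpo
      have hdc : d.contains s = false := hds.trans hpo'
      have hnotin : ∀ p ∈ d.items, ¬ (p.1 = s) := by
        intro p hp hps
        have h0 : d.items.any (fun q => q.1 == s) = false := hdc
        simp only [List.any_eq_false] at h0
        exact absurd (by simp [hps]) (h0 p hp)
      have hfeq : d.items.filter
            (fun p => !(L'.contains p.1 && (p.2 - pe.getD p.1 0 == 0)))
          = d.items.filter
            (fun p => !((s :: L').contains p.1 && (p.2 - pe.getD p.1 0 == 0))) := by
        apply List.filter_congr
        intro p hp; simp [hnotin p hp]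
      have hmeq : (d.items.filter
            (fun p => !((s :: L').contains p.1 && (p.2 - pe.getD p.1 0 == 0)))).map
            (fun p => if L'.contains p.1 then (p.1, p.2 - pe.getD p.1 0) else p)
          = (d.items.filter
            (fun p => !((s :: L').contains p.1 && (p.2 - pe.getD p.1 0 == 0)))).map
            (fun p => if (s :: L').contains p.1 then (p.1, p.2 - pe.getD p.1 0) else p) := by
        apply List.map_congr_left
        intro p hp
        have hpd : p ∈ d.items := (List.mem_filter.mp hp).1
        simp [hnotin p hpd]
      by_cases hz : (0 : Int) - pe.getD s 0 = 0
      · -- inserted zero is immediately popped: dict unchanged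
        have hstep : calculate_recon_step pe po d s = d := by
          have h1 : calculate_recon_step pe po d s = (d.insert s (0 - pe.getD s 0)).erase s := by
            simp [calculate_recon_step, hpo', PySem.Dict.getD_insert_self, hz]
          rw [h1]
          apply PySem.Dict.ext
          show ((d.insert s (0 - pe.getD s 0)).items.filter (fun p => !(p.1 == s))) = _
          rw [PySem.Dict.items_insert_of_not_contains d _ hdc, List.filter_append]
          have h2 : d.items.filter (fun p => !(p.1 == s)) = d.items :=
            List.filter_eq_self.mpr (by intro p hp; simp [hnotin p hp])
          have h3 : ([((s : String), (0 : Int) - pe.getD s 0)].filter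
              (fun p => !(p.1 == s))) = [] := by simp
          rw [h2, h3, List.append_nil]
        rw [hstep]
        rw [ih _ hndL' hk (fun k hkL => hc k (by simp [hkL]))]
        rw [hfeq, hmeq]
        have htail : (s :: L').filter (fun k => !po.contains k && !((0 : Int) - pe.getD k 0 == 0))
            = L'.filter (fun k => !po.contains k && !((0 : Int) - pe.getD k 0 == 0)) := by
          rw [List.filter_cons]; simp [hz]
        rw [htail]
      · -- fresh nonzero entry is appended
        have hstep : calculate_recon_step pe po d s = d.insert s (0 - pe.getD s 0) := by
          have hz' : ¬ (pe.getD s 0 = 0) := fun h => hz (by omega)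
          simp [calculate_recon_step, hpo', PySem.Dict.getD_insert_self, hz']
        rw [hstep]
        have hk' : (d.insert s (0 - pe.getD s 0)).keys.Nodup :=
          PySem.Dict.nodup_keys_insert _ _ _ hk
        have hc' : ∀ k ∈ L', (d.insert s (0 - pe.getD s 0)).contains k = po.contains k := by
          intro k hkL
          have hks : k ≠ s := fun h => hsL' (h ▸ hkL)
          rw [PySem.Dict.contains_insert]
          simp [hks, hc k (by simp [hkL])]
        rw [ih _ hndL' hk' hc']
        rw [PySem.Dict.items_insert_of_not_contains d _ hdc]
        rw [List.filter_append, List.map_append]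
        have hsingle : (([((s : String), (0 : Int) - pe.getD s 0)].filter
              (fun p => !(L'.contains p.1 && (p.2 - pe.getD p.1 0 == 0)))).map
              (fun p => if L'.contains p.1 then (p.1, p.2 - pe.getD p.1 0) else p))
            = [((s : String), (0 : Int) - pe.getD s 0)] := by
          simp [hsL']
        rw [hsingle, hfeq, hmeq]
        have htail : (s :: L').filter (fun k => !po.contains k && !((0 : Int) - pe.getD k 0 == 0))
            = s :: L'.filter (fun k => !po.contains k && !((0 : Int) - pe.getD k 0 == 0)) := by
          have hz' : ¬ (pe.getD s 0 = 0) := fun h => hz (by omega)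
          rw [List.filter_cons]; simp [hpo', hz']
        rw [htail]
        simp

-- key list of the merged dict {**pos_observed, **pos_expected}
theorem pvUnion_keys (pe po : PySem.Dict String Int) (hnd : pe.keys.Nodup) :
    (po.update pe.items).keys = po.keys ++ pe.keys.filter (fun k => !po.keys.contains k) := by
  rw [PySem.Dict.update]
  rw [PySem.Dict.keys_foldl_insert_key pe.items (fun x => x.1) (fun _ x => x.2) po]
  show PySem.Set.update po.keys pe.keys = _
  rw [PySem.Set.update_eq_append_filter]
  rw [PySem.Set.ofList_eq_self_of_nodup _ hnd]
  rfl

-- ===== VERDICT (by name: the statement is the Claim_ definition above) =====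
theorem calculate_recon_spec : Claim_equal_calculate_recon := by
  unfold Claim_equal_calculate_recon Spec_calculate_recon
  intro e o _
  show (let pe := PySem.Dict.ofList e
        let po := PySem.Dict.ofList o
        let recon_fails := pe.keys.foldl (calculate_recon_step pe po) po
        recon_fails.items) = _
  set pe := PySem.Dict.ofList e with hpe
  set po := PySem.Dict.ofList o with hpo
  have hpeN : pe.keys.Nodup := PySem.Dict.nodup_keys_ofList e
  have hpoN : po.keys.Nodup := PySem.Dict.nodup_keys_ofList o
  show (pe.keys.foldl (calculate_recon_step pe po) po).items = _
  rw [pvA_inv pe po pe.keys po hpeN hpoN (fun _ _ => rfl)]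
  show _ = calculate_recon_alt e o
  unfold calculate_recon_alt
  rw [← hpe, ← hpo]
  show _ = ((po.update pe.items).keys.foldl (fun acc s =>
      if ((po.getD s 0 - pe.getD s 0 != 0 || !pe.contains s) = true)
      then acc ++ [(s, po.getD s 0 - pe.getD s 0)] else acc) [])
  rw [PySem.List.foldl_append_if (fun s => (po.getD s 0 - pe.getD s 0 != 0 || !pe.contains s))
      (fun s => (s, po.getD s 0 - pe.getD s 0))]
  rw [pvUnion_keys pe po hpeN]
  rw [List.filter_append, List.map_append, List.nil_append]
  congr 1
  · -- entries at observed keys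
    rw [PySem.Dict.items_eq_map_keys po hpoN 0]
    rw [List.filter_map, List.map_map]
    rw [List.filter_congr
      (q := fun k => (po.getD k 0 - pe.getD k 0 != 0 || !pe.contains k))
      (by
        intro k _
        by_cases hm : k ∈ pe.keys
        · simp [Function.comp, PySem.Dict.contains_eq_decide_mem_keys, hm, Bool.or_comm, bne]
        · simp [Function.comp, PySem.Dict.contains_eq_decide_mem_keys, hm])]
    apply List.map_congr_left
    intro k _
    by_cases hm : k ∈ pe.keys
    · simp [Function.comp, hm]
    · have hnc : pe.contains k = false := by
        rw [PySem.Dict.contains_eq_decide_mem_keys]; simp [hm]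
      have h0 : pe.getD k 0 = 0 := PySem.Dict.getD_of_not_contains pe 0 hnc
      simp [Function.comp, hm, h0]
  · -- entries at expected-only keys
    rw [List.filter_filter]
    have hf2 : pe.keys.filter
          (fun a => (po.getD a 0 - pe.getD a 0 != 0 || !pe.contains a) && !po.keys.contains a)
        = pe.keys.filter (fun k => !po.contains k && !((0 : Int) - pe.getD k 0 == 0)) := by
      apply List.filter_congr
      intro k hkpe
      have hpc : pe.contains k = true := by
        rw [PySem.Dict.contains_eq_decide_mem_keys]; simp [hkpe]
      by_cases hmo : k ∈ po.keys
      · simp [PySem.Dict.contains_eq_decide_mem_keys, hmo]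
      · have hnc : po.contains k = false := by
          rw [PySem.Dict.contains_eq_decide_mem_keys]; simp [hmo]
        have h0 : po.getD k 0 = 0 := PySem.Dict.getD_of_not_contains po 0 hnc
        simp [PySem.Dict.contains_eq_decide_mem_keys, hmo, h0, hkpe, bne]
    rw [hf2]
    apply List.map_congr_left
    intro k hkf
    have hnc : po.contains k = false := by
      have := (List.mem_filter.mp hkf).2
      by_cases h : po.contains k = true <;> simp_all
    have h0 : po.getD k 0 = 0 := PySem.Dict.getD_of_not_contains po 0 hnc
    rw [h0]
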